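-- pv_equiv track=rewrite | github.com/pushpahiremath77/Python_Programs | Practice_Problem/positive_sort.py | positive_sort
-- ===== SOURCE A (Python) =====
-- def positive_sort(list1):
--     positives = sorted([num for num in list1 if num>0])
--     pos_index = 0
--     result = []
--     for num in list1:
--         if num>0:
--             result.append(positives[pos_index])
--             pos_index+=1
--         else:
--             result.append(num)
--     return result
-- ===== SOURCE B (Python) =====
-- def positive_sort(list1):
--     # Selection-sort over the positive slots: repeatedly emit the smallest
--     # remaining positive, swapping the current head into its place.
--     result = []
--     rest = list(list1)
--     while rest:
--         head = rest.pop(0)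
--         if head <= 0:
--             result.append(head)
--             continue
--         m = head
--         for x in rest:
--             if 0 < x < m:
--                 m = x
--         if m == head:
--             result.append(head)
--         else:
--             rest[rest.index(m)] = head
--             result.append(m)
--     return result
-- ===== Notes on version B (the rewrite author's own statement) =====
-- stated objective: alternative
-- what changed: B replaces A's library-sort-then-replay (sort the positives up front, then walk the list replaying them by counter) with a selection sort specialised to positive slots: it repeatedly scans the remaining suffix for the smallest positive, swaps the current head into its place, and emits elements front-to-back, never calling sorted().
import Mathlib
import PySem

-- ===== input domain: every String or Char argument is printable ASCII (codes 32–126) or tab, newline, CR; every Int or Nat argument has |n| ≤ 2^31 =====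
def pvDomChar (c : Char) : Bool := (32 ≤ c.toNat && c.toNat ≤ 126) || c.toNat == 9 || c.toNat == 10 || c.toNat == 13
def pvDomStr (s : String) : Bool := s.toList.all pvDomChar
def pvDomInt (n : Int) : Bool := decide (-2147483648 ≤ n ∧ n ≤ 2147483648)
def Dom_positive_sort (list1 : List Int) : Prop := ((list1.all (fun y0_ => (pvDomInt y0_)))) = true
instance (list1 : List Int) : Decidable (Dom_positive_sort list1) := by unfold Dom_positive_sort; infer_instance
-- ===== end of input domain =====

-- B replaces A's sort-then-replay with a selection sort specialised to the positive slots (alternative decomposition; quadratic, not faster).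


-- ===== PORT A =====
-- positives[pos_index] is always in range (pos_index stays below the number of positives),
-- so the total pyGetD is exact here.
def positive_sort (list1 : List Int) : List Int :=
  let positives := PySem.List.sorted (list1.filter (fun num => decide (0 < num))) (fun x => x) false
  (list1.foldl (fun (st : List Int × Int) num =>
      if 0 < num then (st.1 ++ [PySem.List.pyGetD positives st.2 0], st.2 + 1)
      else (st.1 ++ [num], st.2)) ([], 0)).1

-- ===== PORT B =====
-- The while loop of Source B: rest.pop(0) is the head/tail split; rest.index(m) always finds m
-- (m was seen in rest), so the total `.getD 0` of index? is exact, and the in-range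
-- rest[k] = head is the total pySetD.
def positive_sort_altLoop (result rest : List Int) : List Int :=
  match rest with
  | [] => result
  | head :: rest' =>
    if head ≤ 0 then positive_sort_altLoop (result ++ [head]) rest'
    else
      let m := rest'.foldl (fun m x => if 0 < x ∧ x < m then x else m) head
      if m = head then positive_sort_altLoop (result ++ [head]) rest'
      else positive_sort_altLoop (result ++ [m])
        (PySem.List.pySetD rest' (((PySem.List.index? rest' m).getD 0 : Nat) : Int) head)
termination_by rest.length
decreasing_by
  · simp
  · simp
  · simp [PySem.List.pySetD_natCast]

def positive_sort_alt (list1 : List Int) : List Int :=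
  positive_sort_altLoop [] list1

-- ===== PRECONDITION & SPEC =====
def Spec_positive_sort (list1 : List Int) (out : List Int) : Prop := out = positive_sort_alt list1
instance (list1 : List Int) (out : List Int) : Decidable (Spec_positive_sort list1 out) := by unfold Spec_positive_sort; infer_instance

-- ===== CLAIM (what is proved, stated in full; the proofs are below) =====
def Claim_equal_positive_sort : Prop := ∀ (list1 : List Int), Dom_positive_sort list1 → Spec_positive_sort list1 (positive_sort list1)

-- ===== LEMMAS AND PROOFS =====

/-- Common characterization: consume the sorted positives `ps` along `xs`. -/
def mergeRec : List Int → List Int → List Int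
  | _, [] => []
  | ps, x :: xs => if 0 < x then ps.headD 0 :: mergeRec ps.tail xs else x :: mergeRec ps xs

/-- Shorthand for the sorted positives of a list. -/
def sortedPos (xs : List Int) : List Int :=
  PySem.List.sorted (xs.filter (fun x => decide (0 < x))) (fun x => x) false

theorem pyGetD_eq_drop_headD (ps : List Int) (k : Nat) :
    PySem.List.pyGetD ps (k : Int) 0 = (ps.drop k).headD 0 := by
  rw [PySem.List.pyGetD_natCast]
  rw [List.headD_eq_head?_getD, List.head?_drop]
  simp [List.getD]

theorem aFold (xs : List Int) : ∀ (ps acc : List Int) (k : Nat),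
    (xs.foldl (fun (st : List Int × Int) num =>
      if 0 < num then (st.1 ++ [PySem.List.pyGetD ps st.2 0], st.2 + 1)
      else (st.1 ++ [num], st.2)) (acc, (k : Int))).1 = acc ++ mergeRec (ps.drop k) xs := by
  induction xs with
  | nil => intro ps acc k; simp [mergeRec]
  | cons x xs ih =>
    intro ps acc k
    by_cases hx : 0 < x
    · have hk : ((k : Int) + 1) = ((k + 1 : Nat) : Int) := by push_cast; ring
      simp only [List.foldl_cons, if_pos hx, hk, ih]
      rw [pyGetD_eq_drop_headD]
      simp [mergeRec, hx, List.tail_drop]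
    · simp only [List.foldl_cons, if_neg hx, ih]
      simp [mergeRec, hx]

theorem positive_sort_eq_mergeRec (xs : List Int) :
    positive_sort xs = mergeRec (sortedPos xs) xs := by
  unfold positive_sort sortedPos
  have := aFold xs (PySem.List.sorted (xs.filter (fun x => decide (0 < x))) (fun x => x) false) [] 0
  simpa using this

/-- `mergeRec` only reads the sign pattern and the non-positive values, so overwriting a
positive slot with another positive value does not change it. -/
theorem mergeRec_set_pos (xs : List Int) : ∀ (ps : List Int) (k : Nat) (v : Int),
    (hk : k < xs.length) → 0 < xs[k] → 0 < v →
    mergeRec ps (xs.set k v) = mergeRec ps xs := by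
  induction xs with
  | nil => intro ps k v hk; simp at hk
  | cons x xs ih =>
    intro ps k v hk hxk hv
    cases k with
    | zero => simp at hxk; simp [mergeRec, hxk, hv]
    | succ k =>
      simp at hxk
      have hk' : k < xs.length := by simpa using hk
      simp only [List.set_cons_succ, mergeRec]
      by_cases hx : 0 < x
      · simp [hx, ih ps.tail k v hk' hxk hv]
      · simp [hx, ih ps k v hk' hxk hv]

/-- Properties of Source B's min-scan fold. -/
theorem foldMin_spec (l : List Int) : ∀ (a : Int),
    (l.foldl (fun m x => if 0 < x ∧ x < m then x else m) a = a ∨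
      (l.foldl (fun m x => if 0 < x ∧ x < m then x else m) a ∈ l ∧
        0 < l.foldl (fun m x => if 0 < x ∧ x < m then x else m) a)) ∧
    l.foldl (fun m x => if 0 < x ∧ x < m then x else m) a ≤ a ∧
    ∀ y ∈ l, 0 < y → l.foldl (fun m x => if 0 < x ∧ x < m then x else m) a ≤ y := by
  induction l with
  | nil => intro a; simp
  | cons x l ih =>
    intro a
    by_cases hx : 0 < x ∧ x < a
    · obtain ⟨h1, h2, h3⟩ := ih x
      refine ⟨?_, ?_, ?_⟩
      · rcases h1 with h | h
        · exact Or.inr ⟨by simp [hx, h], by simp [hx]; omega⟩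
        · exact Or.inr ⟨by simp [hx]; exact Or.inr h.1, by simp [hx]; exact h.2⟩
      · simp only [List.foldl_cons, if_pos hx]; omega
      · intro y hy hy0
        simp only [List.foldl_cons, if_pos hx]
        rcases List.mem_cons.mp hy with rfl | hy'
        · exact h2
        · exact h3 y hy' hy0
    · obtain ⟨h1, h2, h3⟩ := ih a
      refine ⟨?_, ?_, ?_⟩
      · rcases h1 with h | h
        · exact Or.inl (by simp [hx, h])
        · exact Or.inr ⟨by simp [hx]; exact Or.inr h.1, by simpa [hx] using h.2⟩
      · simp only [List.foldl_cons, if_neg hx]; exact h2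
      · intro y hy hy0
        simp only [List.foldl_cons, if_neg hx]
        rcases List.mem_cons.mp hy with rfl | hy'
        · omega
        · exact h3 y hy' hy0

/-- Replacing the occurrence of `m` at index `k` by `x` trades `m` for `x` in the positives. -/
theorem filter_set_perm (xs : List Int) : ∀ (k : Nat) (m x : Int),
    (hk : k < xs.length) → xs[k] = m → 0 < m → 0 < x →
    (x :: xs.filter (fun y => decide (0 < y))).Perm
      (m :: (xs.set k x).filter (fun y => decide (0 < y))) := by
  induction xs with
  | nil => intro k m x hk; simp at hk
  | cons z xs ih =>
    intro k m x hk hzk hm hx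
    cases k with
    | zero =>
      simp at hzk; subst hzk
      simp [hm, hx]
      exact List.Perm.swap _ _ _
    | succ k =>
      simp at hzk
      have hk' : k < xs.length := by simpa using hk
      have h := ih k m x hk' hzk hm hx
      simp only [List.set_cons_succ, List.filter_cons]
      by_cases hz : 0 < z
      · simp only [decide_eq_true_eq, if_pos hz]
        exact (List.Perm.swap _ _ _).trans ((h.cons z).trans (List.Perm.swap _ _ _))
      · simp only [decide_eq_true_eq, if_neg hz]
        exact h

/-- `m :: sortedPos l` is the sorted positives of `xs` when it is a permutation of
`xs`'s positives and `m` bounds them below. -/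
theorem sortedPos_eq_cons (xs l : List Int) (m : Int)
    (hperm : (m :: sortedPos l).Perm (xs.filter (fun x => decide (0 < x))))
    (hmin : ∀ y ∈ sortedPos l, m ≤ y) :
    sortedPos xs = m :: sortedPos l := by
  unfold sortedPos
  refine PySem.List.sorted_id_eq_of_perm_of_pairwise _ _ hperm (List.pairwise_cons.mpr ⟨hmin, ?_⟩)
  have h := PySem.List.sorted_pairwise (l.filter (fun x => decide (0 < x))) (fun x => x)
  simpa [sortedPos] using h

/-- Selection-sort loop equals the mergeRec characterization. -/
theorem altLoop_eq (n : Nat) : ∀ (rest : List Int), rest.length ≤ n → ∀ (acc : List Int),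
    positive_sort_altLoop acc rest = acc ++ mergeRec (sortedPos rest) rest := by
  induction n with
  | zero =>
    intro rest hlen acc
    have : rest = [] := List.eq_nil_of_length_eq_zero (Nat.le_zero.mp hlen)
    subst this
    simp [positive_sort_altLoop, mergeRec]
  | succ n ih =>
    intro rest hlen acc
    match rest with
    | [] => simp [positive_sort_altLoop, mergeRec]
    | head :: rest' =>
      have hlen' : rest'.length ≤ n := by simpa using hlen
      rw [positive_sort_altLoop]
      by_cases hh : head ≤ 0
      · rw [if_pos hh, ih rest' hlen' (acc ++ [head])]
        have hsp : sortedPos (head :: rest') = sortedPos rest' := by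
          unfold sortedPos
          simp [show ¬ (0 < head) by omega]
        rw [hsp]
        simp [mergeRec, show ¬ (0 < head) by omega]
      · rw [if_neg hh]
        have hhp : 0 < head := by omega
        obtain ⟨hmem, hlehead, hminr⟩ := foldMin_spec rest' head
        set m := rest'.foldl (fun m x => if 0 < x ∧ x < m then x else m) head with hm
        by_cases hme : m = head
        · rw [if_pos hme, ih rest' hlen' (acc ++ [head])]
          have hsp : sortedPos (head :: rest') = head :: sortedPos rest' := by
            apply sortedPos_eq_cons
            · rw [List.filter_cons]
              simp only [decide_eq_true_eq, if_pos hhp]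
              exact (PySem.List.sorted_perm _ _ _).cons head
            · intro y hy
              have hy' : y ∈ rest'.filter (fun x => decide (0 < x)) := by
                simpa [sortedPos] using (PySem.List.mem_sorted _ _ _ _).mp hy
              have hmem' := List.mem_filter.mp hy'
              have := hminr y hmem'.1 (by simpa using hmem'.2)
              omega
          rw [hsp]
          simp [mergeRec, hhp]
        · rw [if_neg hme]
          have hm_in : m ∈ rest' ∧ 0 < m := by
            rcases hmem with h | h
            · exact absurd h hme
            · exact h
          obtain ⟨hk0, hidx⟩ : ∃ k0, PySem.List.index? rest' m = some k0 :=
            Option.isSome_iff_exists.mp ((PySem.List.index?_isSome_iff _ _).mpr hm_in.1)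
          obtain ⟨hklt, hkm, -⟩ := PySem.List.getElem_of_index?_eq_some hidx
          rw [hidx]
          simp only [Option.getD_some, PySem.List.pySetD_natCast]
          have hlenset : (rest'.set hk0 head).length ≤ n := by simpa using hlen'
          rw [ih (rest'.set hk0 head) hlenset (acc ++ [m])]
          have hperm := filter_set_perm rest' hk0 m head hklt hkm hm_in.2 hhp
          have hsp : sortedPos (head :: rest') = m :: sortedPos (rest'.set hk0 head) := by
            apply sortedPos_eq_cons
            · rw [List.filter_cons]
              simp only [decide_eq_true_eq, if_pos hhp]
              exact (((PySem.List.sorted_perm _ _ _).cons m).trans hperm.symm)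
            · intro y hy
              have hy' : y ∈ (rest'.set hk0 head).filter (fun x => decide (0 < x)) := by
                simpa [sortedPos] using (PySem.List.mem_sorted _ _ _ _).mp hy
              have hy2 : y ∈ m :: (rest'.set hk0 head).filter (fun x => decide (0 < x)) :=
                List.mem_cons_of_mem _ hy'
              have hy3 : y ∈ head :: rest'.filter (fun x => decide (0 < x)) :=
                hperm.symm.mem_iff.mp hy2
              rcases List.mem_cons.mp hy3 with rfl | hy4
              · exact hlehead
              · have := List.mem_filter.mp hy4
                exact hminr y this.1 (by simpa using this.2)
          rw [hsp,
            mergeRec_set_pos rest' (sortedPos (rest'.set hk0 head)) hk0 head hklt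
              (by rw [hkm]; exact hm_in.2) hhp]
          simp [mergeRec, hhp]

theorem positive_sort_alt_eq_mergeRec (xs : List Int) :
    positive_sort_alt xs = mergeRec (sortedPos xs) xs := by
  unfold positive_sort_alt
  simpa using altLoop_eq xs.length xs le_rfl []

-- ===== VERDICT (by name: the statement is the Claim_ definition above) =====
theorem positive_sort_spec : Claim_equal_positive_sort := by
  intro list1 _
  unfold Spec_positive_sort
  rw [positive_sort_eq_mergeRec, positive_sort_alt_eq_mergeRec]
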